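-- pv_equiv track=rewrite | github.com/miliar/Code_Jam_Webscraper | Solutions_python/Problem_155/1209.py | get_needed_friends
-- ===== SOURCE A (Python) =====
-- def get_needed_friends(shy_people):
--     total_standing = 0
--     total_needed = 0
--
--     for shy_level, people in enumerate(shy_people[:-1]):
--         total_standing += people
--
--         if total_standing < shy_level + 1:
--             needed = shy_level + 1 - total_standing
--             total_needed += needed
--             total_standing += needed
--
--     return total_needed
-- ===== SOURCE B (Python) =====
-- def get_needed_friends(shy_people):
--     sums = []
--     running = 0
--     for people in shy_people[:-1]:
--         running += people
--         sums.append(running)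
--     deficits = [level + 1 - s for level, s in enumerate(sums)]
--     return max([0] + deficits)
-- ===== Notes on version B (the rewrite author's own statement) =====
-- stated objective: alternative
-- what changed: B replaces A's single fused loop with a conditional top-up feeding recruited friends back into the standing count by three staged passes: build the plain prefix-sum list, form the deficit (level+1)-prefix for each level, and return the maximum deficit floored at 0.
import Mathlib
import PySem

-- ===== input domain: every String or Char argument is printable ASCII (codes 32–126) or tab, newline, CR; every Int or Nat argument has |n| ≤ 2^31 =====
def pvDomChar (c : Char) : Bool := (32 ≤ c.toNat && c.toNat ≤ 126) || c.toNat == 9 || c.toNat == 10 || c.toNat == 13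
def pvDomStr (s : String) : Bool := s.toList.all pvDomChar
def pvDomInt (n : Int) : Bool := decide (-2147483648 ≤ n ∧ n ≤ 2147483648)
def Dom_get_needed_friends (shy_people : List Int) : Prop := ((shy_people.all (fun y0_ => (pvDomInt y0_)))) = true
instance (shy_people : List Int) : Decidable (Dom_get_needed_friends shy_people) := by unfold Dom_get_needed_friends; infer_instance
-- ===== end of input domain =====

-- B replaces A's fused loop (conditional top-up feeding recruited friends back into the
-- standing count) by staged passes: prefix-sum list, deficit list, then max floored at 0.


-- ===== PORT A =====
def get_needed_friends (shy_people : List Int) : Int :=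
  ((PySem.List.enumerate (PySem.List.slice shy_people none (some (-1))) 0).foldl
    (fun (st : Int × Int) p =>
      let total_standing := st.1 + p.2
      if total_standing < p.1 + 1 then
        let needed := p.1 + 1 - total_standing
        (total_standing + needed, st.2 + needed)
      else (total_standing, st.2)) (0, 0)).2

-- ===== PORT B =====
def get_needed_friends_alt (shy_people : List Int) : Int :=
  let sums := ((PySem.List.slice shy_people none (some (-1))).foldl
    (fun (st : Int × List Int) people =>
      (st.1 + people, st.2 ++ [st.1 + people])) ((0 : Int), ([] : List Int))).2
  let deficits := (PySem.List.enumerate sums 0).map (fun p => p.1 + 1 - p.2)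
  (PySem.List.max? ((0 : Int) :: deficits) (fun y => y)).getD 0

-- ===== PRECONDITION & SPEC =====
def Spec_get_needed_friends (shy_people : List Int) (out : Int) : Prop := out = get_needed_friends_alt shy_people
instance (shy_people : List Int) (out : Int) : Decidable (Spec_get_needed_friends shy_people out) := by unfold Spec_get_needed_friends; infer_instance

-- ===== CLAIM (what is proved, stated in full; the proofs are below) =====
def Claim_equal_get_needed_friends : Prop := ∀ (shy_people : List Int), Dom_get_needed_friends shy_people → Spec_get_needed_friends shy_people (get_needed_friends shy_people)

-- ===== LEMMAS AND PROOFS =====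

-- The prefix sums starting from `pfx`, as B's first loop produces them.
def pvPfx (pfx : Int) : List Int → List Int
  | [] => []
  | x :: l => (pfx + x) :: pvPfx (pfx + x) l

-- B's first fold builds exactly the prefix-sum list.
theorem pvPfx_fold (l : List Int) : ∀ (pfx : Int) (acc : List Int),
    (l.foldl (fun (st : Int × List Int) people =>
      (st.1 + people, st.2 ++ [st.1 + people])) (pfx, acc)).2 = acc ++ pvPfx pfx l := by
  induction l with
  | nil => intro pfx acc; simp [pvPfx]
  | cons x l ih => intro pfx acc; simp [pvPfx, ih, List.append_assoc]

-- Loop invariant: A's standing count equals the plain prefix sum plus A's friends-so-far,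
-- and A's friends-so-far equals the running max of the deficits over the prefix sums.
theorem gnf_loop_eq (l : List Int) : ∀ (s standing needed pfx : Int),
    standing = pfx + needed →
    ((PySem.List.enumerate l s).foldl
      (fun (st : Int × Int) p =>
        let total_standing := st.1 + p.2
        if total_standing < p.1 + 1 then
          let needed := p.1 + 1 - total_standing
          (total_standing + needed, st.2 + needed)
        else (total_standing, st.2)) (standing, needed)).2 =
    ((PySem.List.enumerate (pvPfx pfx l) s).map (fun p => p.1 + 1 - p.2)).foldl max needed := by
  induction l with
  | nil => intro s standing needed pfx _; simp [pvPfx, PySem.List.enumerate_nil]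
  | cons x l ih =>
      intro s standing needed pfx h1
      rw [PySem.List.enumerate_cons]
      simp only [pvPfx, PySem.List.enumerate_cons, List.map_cons, List.foldl_cons]
      by_cases hc : standing + x < s + 1
      · rw [if_pos hc]
        have hm : max needed (s + 1 - (pfx + x)) = needed + (s + 1 - (standing + x)) := by
          rw [max_def]; split_ifs <;> omega
        rw [hm]; apply ih; omega
      · rw [if_neg hc]
        have hm : max needed (s + 1 - (pfx + x)) = needed := by
          rw [max_def]; split_ifs <;> omega
        rw [hm]; apply ih; omega

-- ===== VERDICT (by name: the statement is the Claim_ definition above) =====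
theorem get_needed_friends_spec : Claim_equal_get_needed_friends := by
  intro xs _
  unfold Spec_get_needed_friends get_needed_friends get_needed_friends_alt
  simp only [pvPfx_fold, List.nil_append, PySem.List.max?_id_cons, Option.getD_some]
  exact gnf_loop_eq _ 0 0 0 0 rfl
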